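-- pv_equiv track=rewrite | github.com/tqmsh/LC | greedy/P10298 [CCC 2024 S4] Painting Roads.py | paint_roads
-- ===== SOURCE A (Python) =====
-- from collections import defaultdict
-- from typing import List, Tuple
--
-- def dfs(u, vis: set, e, dep, col):
--     vis.add(u)  # 将当前节点标记为已访问
--     for v, edge_idx in e[u]:
--         if v in vis: continue  # 如果该邻接节点已经访问过，则跳过
--         # 根据当前深度的奇偶性为边染色，奇偶性分类讨论
--         if dep % 2 == 0: col[edge_idx] = 'R'  # 偶数深度染红色
--         else: col[edge_idx] = 'B'  # 奇数深度染蓝色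
--         dfs(v, vis, e, dep + 1, col)  # 递归调用DFS，遍历下一个节点，并将深度加一
--
-- def paint_roads(n: int, roads: List[Tuple[int, int]]) -> str:
--     e = defaultdict(list)  # 用邻接表表示图
--     for edge_idx, (u, v) in enumerate(roads):
--         e[u].append((v, edge_idx))  # 添加边到邻接表中
--         e[v].append((u, edge_idx))  # 添加反向边，图是无向图
--     vis = set()  # 创建集合用于存储访问过的节点
--     col = ['G'] * len(roads)  # 初始化颜色数组为灰色
--
--     # 遍历每个节点，确保每个连通分量都被访问
--     for i in range(1, n + 1):
--         if i not in vis: dfs(i, vis, e, 0, col)  # 对未访问的节点调用DFS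
--     return ''.join(col)  # 返回染色方案作为字符串
-- ===== SOURCE B (Python) =====
-- from typing import List, Tuple
--
-- def paint_roads(n: int, roads: List[Tuple[int, int]]) -> str:
--     # iterative DFS with an explicit stack of (node, depth, remaining-neighbors) frames
--     e = {}
--     for idx, (u, v) in enumerate(roads):
--         e.setdefault(u, []).append((v, idx))
--         e.setdefault(v, []).append((u, idx))
--     vis = set()
--     col = ['G'] * len(roads)
--     for s in range(1, n + 1):
--         if s in vis:
--             continue
--         vis.add(s)
--         stack = [(s, 0, e.get(s, []))]
--         while stack:
--             u, dep, rem = stack[-1]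
--             k = 0
--             while k < len(rem) and rem[k][0] in vis:
--                 k += 1
--             if k == len(rem):
--                 stack.pop()
--             else:
--                 v, idx = rem[k]
--                 col[idx] = 'R' if dep % 2 == 0 else 'B'
--                 vis.add(v)
--                 stack[-1] = (u, dep, rem[k + 1:])
--                 stack.append((v, dep + 1, e.get(v, [])))
--     return ''.join(col)
-- ===== Notes on version B (the rewrite author's own statement) =====
-- stated objective: idiomatic
-- what changed: Replaced the recursive dfs helper by an iterative DFS with an explicit stack of (node, depth, remaining-neighbors) frames inside a single function, visiting the same spanning tree in the same order.
import Mathlib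
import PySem

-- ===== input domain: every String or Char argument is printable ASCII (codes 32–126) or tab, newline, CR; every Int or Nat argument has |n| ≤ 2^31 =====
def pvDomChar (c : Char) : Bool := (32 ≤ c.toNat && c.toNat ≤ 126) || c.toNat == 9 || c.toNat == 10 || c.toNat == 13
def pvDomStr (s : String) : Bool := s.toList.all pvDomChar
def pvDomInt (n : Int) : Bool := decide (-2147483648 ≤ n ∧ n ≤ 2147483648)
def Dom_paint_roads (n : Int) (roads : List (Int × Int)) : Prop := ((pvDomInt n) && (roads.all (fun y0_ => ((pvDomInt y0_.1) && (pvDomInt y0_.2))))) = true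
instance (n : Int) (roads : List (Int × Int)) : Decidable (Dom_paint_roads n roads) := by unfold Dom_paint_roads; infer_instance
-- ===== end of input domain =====

-- 'vis' (Python set, used only for add/membership; its iteration order is never consumed) is
-- modeled by Std.HashSet Int in both ports so that membership is constant-time, as in Python.
-- B replaces A's recursive DFS helper by an explicit-stack iterative DFS (same tree, same colors);
-- equivalence is about the return value. Both ports carry a fuel guard (threaded, never exhausted
-- in Python-reachable runs) solely to make the recursions total.

-- ===== PORT A =====
-- adjacency list: defaultdict(list) with both directions, edges indexed in order
def buildAdjA (roads : List (Int × Int)) : PySem.Dict Int (List (Int × Int)) :=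
  (PySem.List.enumerate roads 0).foldl
    (fun e p =>
      let e1 := e.modify p.2.1 [] (fun l => l ++ [(p.2.2, p.1)])
      e1.modify p.2.2 [] (fun l => l ++ [(p.2.1, p.1)]))
    PySem.Dict.empty

-- recursive dfs of A; Option result: none = fuel exhausted (guard only); first component =
-- fuel consumed (one unit per node marked visited)
mutual
def dfsA (fuel : Nat) (e : PySem.Dict Int (List (Int × Int))) (u : Int) (dep : Int)
    (vis : Std.HashSet Int) (col : List Char) : Option (Nat × Std.HashSet Int × List Char) :=
  match fuel with
  | 0 => none
  | f + 1 =>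
    (dfsListA f e (e.getD u []) dep (vis.insert u) col).map (fun r => (r.1 + 1, r.2))
termination_by (fuel, 0, 0)
decreasing_by
  simp_wf
  exact Prod.Lex.left _ _ (by omega)

def dfsListA (fuel : Nat) (e : PySem.Dict Int (List (Int × Int))) (adj : List (Int × Int))
    (dep : Int) (vis : Std.HashSet Int) (col : List Char) :
    Option (Nat × Std.HashSet Int × List Char) :=
  match adj with
  | [] => some (0, vis, col)
  | (v, idx) :: rest =>
    if vis.contains v then dfsListA fuel e rest dep vis col
    else
      match dfsA fuel e v (dep + 1) vis
          (PySem.List.pySetD col idx (if PySem.Int.mod dep 2 = 0 then 'R' else 'B')) with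
      | none => none
      | some (c, vc) =>
        (dfsListA (fuel - c) e rest dep vc.1 vc.2).map (fun r => (c + r.1, r.2))
termination_by (fuel, 1, adj.length)
decreasing_by
  all_goals simp_wf
  · exact Prod.Lex.right _ (Prod.Lex.right _ (by omega))
  · exact Prod.Lex.right _ (Prod.Lex.left _ _ (by omega))
  · rcases Nat.lt_or_ge (fuel - c) fuel with h | h
    · exact Prod.Lex.left _ _ h
    · have hh : fuel - c = fuel := by omega
      rw [hh]
      exact Prod.Lex.right _ (Prod.Lex.right _ (by omega))
end

def paint_roads (n : Int) (roads : List (Int × Int)) : String :=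
  let e := buildAdjA roads
  let col0 : List Char := List.replicate roads.length 'G'
  let fuel := n.toNat + 2 * roads.length + 1
  let res := (PySem.List.pyRange 1 (n + 1) 1).foldl
    (fun st i =>
      match st with
      | none => none
      | some (f, vis, col) =>
        if vis.contains i then some (f, vis, col)
        else
          match dfsA f e i 0 vis col with
          | none => none
          | some (c, vc) => some (f - c, vc.1, vc.2))
    (some (fuel, (∅ : Std.HashSet Int), col0))
  match res with
  | some (_, _, col) => String.ofList col
  | none => ""

-- ===== PORT B =====
-- same adjacency list, built with setdefault-style insert
def buildAdjB (roads : List (Int × Int)) : PySem.Dict Int (List (Int × Int)) :=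
  (PySem.List.enumerate roads 0).foldl
    (fun e p =>
      let e1 := e.insert p.2.1 ((e.getD p.2.1 []) ++ [(p.2.2, p.1)])
      e1.insert p.2.2 ((e1.getD p.2.2 []) ++ [(p.2.1, p.1)]))
    PySem.Dict.empty

-- the inner 'while k < len(rem) and rem[k][0] in vis' scan: first unvisited neighbor + the suffix after it
def findNextB (rem : List (Int × Int)) (vis : Std.HashSet Int) :
    Option (Int × Int × List (Int × Int)) :=
  match rem with
  | [] => none
  | (v, idx) :: rest =>
    if vis.contains v then findNextB rest vis else some (v, idx, rest)

-- the 'while stack' loop; frames are (node, depth, remaining neighbors); fuel as in port A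
def runB (fuel : Nat) (e : PySem.Dict Int (List (Int × Int)))
    (stack : List (Int × Int × List (Int × Int))) (vis : Std.HashSet Int) (col : List Char) :
    Option (Nat × Std.HashSet Int × List Char) :=
  match stack with
  | [] => some (0, vis, col)
  | (u, dep, rem) :: rest =>
    match findNextB rem vis with
    | none => runB fuel e rest vis col
    | some (v, idx, rem') =>
      match fuel with
      | 0 => none
      | f + 1 =>
        (runB f e ((v, dep + 1, e.getD v []) :: (u, dep, rem') :: rest)
            (vis.insert v)
            (PySem.List.pySetD col idx (if PySem.Int.mod dep 2 = 0 then 'R' else 'B'))).map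
          (fun r => (r.1 + 1, r.2))
termination_by (fuel, stack.length)
decreasing_by
  all_goals simp_wf
  · exact Prod.Lex.right _ (by omega)
  · exact Prod.Lex.left _ _ (by omega)

def paint_roads_alt (n : Int) (roads : List (Int × Int)) : String :=
  let e := buildAdjB roads
  let col0 : List Char := List.replicate roads.length 'G'
  let fuel := n.toNat + 2 * roads.length + 1
  let res := (PySem.List.pyRange 1 (n + 1) 1).foldl
    (fun st s =>
      match st with
      | none => none
      | some (f, vis, col) =>
        if vis.contains s then some (f, vis, col)
        else
          match f with
          | 0 => none
          | f' + 1 =>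
            match runB f' e [(s, 0, e.getD s [])] (vis.insert s) col with
            | none => none
            | some (c, vc) => some (f' - c, vc.1, vc.2))
    (some (fuel, (∅ : Std.HashSet Int), col0))
  match res with
  | some (_, _, col) => String.ofList col
  | none => ""

-- ===== PRECONDITION & SPEC =====
def Spec_paint_roads (n : Int) (roads : List (Int × Int)) (out : String) : Prop := out = paint_roads_alt n roads
instance (n : Int) (roads : List (Int × Int)) (out : String) : Decidable (Spec_paint_roads n roads out) := by unfold Spec_paint_roads; infer_instance

-- ===== CLAIM (what is proved, stated in full; the proofs are below) =====
def Claim_equal_paint_roads : Prop := ∀ (n : Int) (roads : List (Int × Int)), Dom_paint_roads n roads → Spec_paint_roads n roads (paint_roads n roads)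

-- ===== LEMMAS AND PROOFS =====

theorem buildAdj_eq (roads : List (Int × Int)) : buildAdjB roads = buildAdjA roads := by
  rfl

theorem dfsA_zero (e : PySem.Dict Int (List (Int × Int))) (u dep : Int) (vis : Std.HashSet Int)
    (col : List Char) : dfsA 0 e u dep vis col = none := by
  rw [dfsA]

theorem dfsA_succ (f : Nat) (e : PySem.Dict Int (List (Int × Int))) (u dep : Int)
    (vis : Std.HashSet Int) (col : List Char) :
    dfsA (f + 1) e u dep vis col =
      (dfsListA f e (e.getD u []) dep (vis.insert u) col).map
        (fun r => (r.1 + 1, r.2)) := by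
  rw [dfsA]

theorem dfsListA_nil (f : Nat) (e : PySem.Dict Int (List (Int × Int))) (dep : Int)
    (vis : Std.HashSet Int) (col : List Char) : dfsListA f e [] dep vis col = some (0, vis, col) := by
  rw [dfsListA]

theorem dfsListA_cons_mem {v : Int} {vis : Std.HashSet Int} (hm : v ∈ vis) (f : Nat)
    (e : PySem.Dict Int (List (Int × Int))) (idx : Int) (rem : List (Int × Int)) (dep : Int)
    (col : List Char) :
    dfsListA f e ((v, idx) :: rem) dep vis col = dfsListA f e rem dep vis col := by
  rw [dfsListA]
  simp [hm]

theorem dfsListA_cons_not_mem {v : Int} {vis : Std.HashSet Int} (hm : ¬ v ∈ vis) (f : Nat)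
    (e : PySem.Dict Int (List (Int × Int))) (idx : Int) (rem : List (Int × Int)) (dep : Int)
    (col : List Char) :
    dfsListA f e ((v, idx) :: rem) dep vis col =
      match dfsA f e v (dep + 1) vis
          (PySem.List.pySetD col idx (if PySem.Int.mod dep 2 = 0 then 'R' else 'B')) with
      | none => none
      | some (c, vc) => (dfsListA (f - c) e rem dep vc.1 vc.2).map (fun r => (c + r.1, r.2)) := by
  rw [dfsListA]
  simp [hm]

theorem findNextB_cons_mem {v : Int} {vis : Std.HashSet Int} (hm : v ∈ vis) (idx : Int)
    (rem : List (Int × Int)) : findNextB ((v, idx) :: rem) vis = findNextB rem vis := by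
  simp [findNextB, hm]

theorem findNextB_cons_not_mem {v : Int} {vis : Std.HashSet Int} (hm : ¬ v ∈ vis) (idx : Int)
    (rem : List (Int × Int)) : findNextB ((v, idx) :: rem) vis = some (v, idx, rem) := by
  simp [findNextB, hm]

theorem runB_nil (f : Nat) (e : PySem.Dict Int (List (Int × Int))) (vis : Std.HashSet Int)
    (col : List Char) : runB f e [] vis col = some (0, vis, col) := by
  rw [runB]

theorem runB_pop {rem : List (Int × Int)} {vis : Std.HashSet Int}
    (hfind : findNextB rem vis = none) (f : Nat) (e : PySem.Dict Int (List (Int × Int)))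
    (u dep : Int) (rest : List (Int × Int × List (Int × Int))) (col : List Char) :
    runB f e ((u, dep, rem) :: rest) vis col = runB f e rest vis col := by
  rw [runB]
  simp [hfind]

theorem runB_push_zero {rem : List (Int × Int)} {vis : Std.HashSet Int} {v idx : Int}
    {rem' : List (Int × Int)} (hfind : findNextB rem vis = some (v, idx, rem'))
    (e : PySem.Dict Int (List (Int × Int))) (u dep : Int)
    (rest : List (Int × Int × List (Int × Int))) (col : List Char) :
    runB 0 e ((u, dep, rem) :: rest) vis col = none := by
  rw [runB]
  simp [hfind]

theorem runB_push_succ {rem : List (Int × Int)} {vis : Std.HashSet Int} {v idx : Int}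
    {rem' : List (Int × Int)} (hfind : findNextB rem vis = some (v, idx, rem')) (f : Nat)
    (e : PySem.Dict Int (List (Int × Int))) (u dep : Int)
    (rest : List (Int × Int × List (Int × Int))) (col : List Char) :
    runB (f + 1) e ((u, dep, rem) :: rest) vis col =
      (runB f e ((v, dep + 1, e.getD v []) :: (u, dep, rem') :: rest) (vis.insert v)
          (PySem.List.pySetD col idx (if PySem.Int.mod dep 2 = 0 then 'R' else 'B'))).map
        (fun r => (r.1 + 1, r.2)) := by
  rw [runB]
  simp [hfind]

theorem runB_skip {v : Int} {vis : Std.HashSet Int} (hm : v ∈ vis) (f : Nat)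
    (e : PySem.Dict Int (List (Int × Int))) (u dep idx : Int) (rem' : List (Int × Int))
    (rest : List (Int × Int × List (Int × Int))) (col : List Char) :
    runB f e ((u, dep, (v, idx) :: rem') :: rest) vis col
      = runB f e ((u, dep, rem') :: rest) vis col := by
  conv_lhs => rw [runB]
  conv_rhs => rw [runB]
  rw [findNextB_cons_mem hm]

-- the stack machine run on a frame (u, dep, rem) :: rest is: A's neighbor loop on rem, then the rest
theorem runB_frame (f : Nat) (e : PySem.Dict Int (List (Int × Int))) :
    ∀ (u dep : Int) (rem : List (Int × Int)) (rest : List (Int × Int × List (Int × Int)))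
      (vis : Std.HashSet Int) (col : List Char),
      runB f e ((u, dep, rem) :: rest) vis col =
        match dfsListA f e rem dep vis col with
        | none => none
        | some (c, vc) => (runB (f - c) e rest vc.1 vc.2).map (fun r => (c + r.1, r.2)) := by
  induction f using Nat.strong_induction_on with
  | _ f IHf =>
  intro u dep rem rest vis col
  induction rem with
  | nil =>
    rw [runB_pop rfl, dfsListA_nil]
    simp only [Nat.sub_zero]
    cases runB f e rest vis col <;> simp
  | cons p rem' IHrem =>
    obtain ⟨v, idx⟩ := p
    by_cases hm : v ∈ vis
    · rw [runB_skip hm, IHrem, dfsListA_cons_mem hm]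
    · cases f with
      | zero =>
        rw [runB_push_zero (findNextB_cons_not_mem hm idx rem'),
          dfsListA_cons_not_mem hm, dfsA_zero]
      | succ f1 =>
        rw [runB_push_succ (findNextB_cons_not_mem hm idx rem'), IHf f1 (by omega),
          dfsListA_cons_not_mem hm, dfsA_succ]
        cases hd : dfsListA f1 e (e.getD v []) (dep + 1) (vis.insert v)
            (PySem.List.pySetD col idx (if PySem.Int.mod dep 2 = 0 then 'R' else 'B')) with
        | none => simp
        | some r1 =>
          obtain ⟨c, vis1, col1⟩ := r1
          simp only [Option.map_some, Nat.add_sub_add_right]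
          rw [IHf (f1 - c) (by omega)]
          cases hd2 : dfsListA (f1 - c) e rem' dep vis1 col1 with
          | none => simp
          | some r2 =>
            obtain ⟨c2, vis2, col2⟩ := r2
            simp only [Option.map_some]
            have harith : f1 + 1 - (c + 1 + c2) = f1 - c - c2 := by omega
            rw [harith]
            cases hr : runB (f1 - c - c2) e rest vis2 col2 with
            | none => simp
            | some r3 =>
              simp only [Option.map_some, Option.some.injEq, Prod.mk.injEq]
              exact ⟨by omega, trivial⟩

theorem step_eq (e : PySem.Dict Int (List (Int × Int)))
    (st : Option (Nat × Std.HashSet Int × List Char)) (i : Int) :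
    (match st with
      | none => none
      | some (f, vis, col) =>
        if vis.contains i then some (f, vis, col)
        else
          match f with
          | 0 => none
          | f' + 1 =>
            match runB f' e [(i, 0, e.getD i [])] (vis.insert i) col with
            | none => none
            | some (c, vc) => some (f' - c, vc.1, vc.2)) =
    (match st with
      | none => none
      | some (f, vis, col) =>
        if vis.contains i then some (f, vis, col)
        else
          match dfsA f e i 0 vis col with
          | none => none
          | some (c, vc) => some (f - c, vc.1, vc.2)) := by
  cases st with
  | none => rfl
  | some s =>
    obtain ⟨f, vis, col⟩ := s
    by_cases hm : i ∈ vis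
    · simp [hm]
    · cases f with
      | zero => simp [dfsA_zero]
      | succ f' =>
        have hrb := runB_frame f' e i 0 (e.getD i []) [] (vis.insert i) col
        simp only [runB_nil] at hrb
        show (if vis.contains i = true then some (f' + 1, vis, col)
              else match runB f' e [(i, 0, e.getD i [])] (vis.insert i) col with
                | none => none
                | some (c, vc) => some (f' - c, vc.1, vc.2)) =
             (if vis.contains i = true then some (f' + 1, vis, col)
              else match dfsA (f' + 1) e i 0 vis col with
                | none => none
                | some (c, vc) => some (f' + 1 - c, vc.1, vc.2))
        congr 1
        rw [hrb, dfsA_succ]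
        cases hd : dfsListA f' e (e.getD i []) 0 (vis.insert i) col with
        | none => simp
        | some r =>
          obtain ⟨c, vc⟩ := r
          simp [Nat.add_sub_add_right]

-- ===== VERDICT (by name: the statement is the Claim_ definition above) =====
theorem paint_roads_spec : Claim_equal_paint_roads := by
  unfold Claim_equal_paint_roads Spec_paint_roads
  intro n roads _
  unfold paint_roads paint_roads_alt
  rw [buildAdj_eq]
  have hres := List.foldl_ext (l := PySem.List.pyRange 1 (n + 1) 1)
    (α := Option (Nat × Std.HashSet Int × List Char)) _ _
    (some (n.toNat + 2 * roads.length + 1, (∅ : Std.HashSet Int),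
      (List.replicate roads.length 'G' : List Char)))
    (fun st b _ => (step_eq (buildAdjA roads) st b).symm)
  exact congrArg (fun r => match r with
    | some (_, _, col) => String.ofList col
    | none => "") hres
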